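-- pv_equiv track=rewrite | github.com/mozzytop/rt-qPCR-Gene-Primer-Finder | app.py | _build_highlight_spans
-- ===== SOURCE A (Python) =====
-- def _find_all_occurrences(sequence: str, motif: str) -> list[tuple[int, int]]:
--     """Return all non-overlapping motif spans within sequence."""
--     spans: list[tuple[int, int]] = []
--     if not motif:
--         return spans
--     start = 0
--     while True:
--         idx = sequence.find(motif, start)
--         if idx == -1:
--             break
--         spans.append((idx, idx + len(motif)))
--         start = idx + len(motif)
--     return spans
--
-- def _build_highlight_spans(sequence: str, fwd: str, rev_comp: str) -> list[tuple[int, int, str]]: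
--     """Return sequence spans for forward and reverse-complement highlights."""
--     spans: list[tuple[int, int, str]] = []
--     occupied: set[int] = set()
--     for start, end in _find_all_occurrences(sequence, fwd.lower()):
--         spans.append((start, end, "report-highlight-fwd"))
--         occupied.update(range(start, end))
--     for start, end in _find_all_occurrences(sequence, rev_comp.lower()):
--         if any(idx in occupied for idx in range(start, end)):
--             continue
--         spans.append((start, end, "report-highlight-rc"))
--     spans.sort(key=lambda item: item[0])
--     return spans
-- ===== SOURCE B (Python) =====
-- def _build_highlight_spans(sequence: str, fwd: str, rev_comp: str) -> list[tuple[int, int, str]]: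
--     """Sliding-window scan for occurrences + interval-disjointness filter; no str.find loop, no per-character occupied set."""
--     def occurrences(motif: str) -> list[tuple[int, int]]:
--         out: list[tuple[int, int]] = []
--         m = len(motif)
--         if m == 0:
--             return out
--         i = 0
--         while i + m <= len(sequence):
--             if sequence[i:i + m] == motif:
--                 out.append((i, i + m))
--                 i += m
--             else:
--                 i += 1
--         return out
--
--     fwd_spans = occurrences(fwd.lower())
--     rc_spans = [sp for sp in occurrences(rev_comp.lower())
--                 if all(sp[1] <= fs or fe <= sp[0] for fs, fe in fwd_spans)]
--     return sorted([(s, e, "report-highlight-fwd") for s, e in fwd_spans]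
--                   + [(s, e, "report-highlight-rc") for s, e in rc_spans],
--                   key=lambda item: item[0])
-- ===== Notes on version B (the rewrite author's own statement) =====
-- stated objective: alternative
-- what changed: B replaces A's str.find-based occurrence loop with an explicit sliding-window scan (compare sequence[i:i+m] == motif, jump by m on a hit), drops A's per-character 'occupied' index set in favour of an interval-disjointness filter of each reverse-complement span against the forward spans, and assembles the result as filter/comprehension + concatenation + sort instead of A's two appending loops over a mutable set.
import Mathlib
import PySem

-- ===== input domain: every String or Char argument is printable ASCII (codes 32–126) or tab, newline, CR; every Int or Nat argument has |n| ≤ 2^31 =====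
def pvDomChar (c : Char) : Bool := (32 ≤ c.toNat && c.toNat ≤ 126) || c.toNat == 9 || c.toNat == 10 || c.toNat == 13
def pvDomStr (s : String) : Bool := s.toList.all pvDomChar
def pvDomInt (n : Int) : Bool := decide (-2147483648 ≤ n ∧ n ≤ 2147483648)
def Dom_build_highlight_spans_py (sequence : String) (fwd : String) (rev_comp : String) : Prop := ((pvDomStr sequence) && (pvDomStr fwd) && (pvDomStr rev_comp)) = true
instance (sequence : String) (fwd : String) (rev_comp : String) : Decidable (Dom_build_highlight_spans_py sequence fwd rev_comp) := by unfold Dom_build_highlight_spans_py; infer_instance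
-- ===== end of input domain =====

-- B replaces A's str.find loop and per-character 'occupied' set by a sliding-window scan and an
-- interval-disjointness filter of rc spans against fwd spans (objective: alternative; return value only).

-- ===== PORT A =====
-- _find_all_occurrences as written in Source A: the while-loop around sequence.find(motif, start),
-- with fuel = len(sequence) + 1 (the start strictly increases each iteration and never exceeds len).
def pvFindAllAux (s m : List Char) : Nat → Nat → List (Int × Int)
  | _, 0 => []
  | start, fuel + 1 =>
    let idx := PySem.Chars.findFrom s m (start : Int) none
    if idx = -1 then []
    else (idx, idx + (m.length : Int)) :: pvFindAllAux s m (idx.toNat + m.length) fuel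

def pvFindAll (s m : List Char) : List (Int × Int) :=
  if m.isEmpty then [] else pvFindAllAux s m 0 (s.length + 1)

def build_highlight_spans_py (sequence : String) (fwd : String) (rev_comp : String) : List (Int × Int × String) :=
  let st := (pvFindAll sequence.toList (PySem.Chars.lower fwd.toList)).foldl
    (fun (acc : List (Int × Int × String) × PySem.Set Int) se =>
      (acc.1 ++ [(se.1, se.2, "report-highlight-fwd")],
       PySem.Set.update acc.2 (PySem.List.pyRange se.1 se.2 1)))
    ([], PySem.Set.empty)
  let spans := (pvFindAll sequence.toList (PySem.Chars.lower rev_comp.toList)).foldl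
    (fun (acc : List (Int × Int × String)) se =>
      if (PySem.List.pyRange se.1 se.2 1).any (fun idx => PySem.Set.contains st.2 idx) then acc
      else acc ++ [(se.1, se.2, "report-highlight-rc")])
    st.1
  PySem.List.sorted spans (fun item => item.1) false

-- ===== PORT B =====
-- Source B's sliding-window 'occurrences': compare sequence[i:i+m] with the motif at each position,
-- jumping by m on a hit.  The slice sequence[i:i+m] with 0 ≤ i and i+m ≤ len(sequence) is exactly
-- (s.drop i).take m.length.  The while-loop advances i by ≥ 1 each iteration, so fuel = len + 1.
def pvScanOcc (s m : List Char) : Nat → Nat → List (Int × Int)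
  | 0, _ => []
  | fuel + 1, i =>
    if i + m.length ≤ s.length then
      if (s.drop i).take m.length = m then
        ((i : Int), ((i + m.length : Nat) : Int)) :: pvScanOcc s m fuel (i + m.length)
      else pvScanOcc s m fuel (i + 1)
    else []

def pvOccurrences (s m : List Char) : List (Int × Int) :=
  if m.length = 0 then [] else pvScanOcc s m (s.length + 1) 0

def build_highlight_spans_py_alt (sequence : String) (fwd : String) (rev_comp : String) : List (Int × Int × String) :=
  let fwdSpans := pvOccurrences sequence.toList (PySem.Chars.lower fwd.toList)
  let rcSpans := (pvOccurrences sequence.toList (PySem.Chars.lower rev_comp.toList)).filter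
    (fun sp => fwdSpans.all (fun f => decide (sp.2 ≤ f.1) || decide (f.2 ≤ sp.1)))
  PySem.List.sorted
    (fwdSpans.map (fun se => (se.1, se.2, "report-highlight-fwd")) ++
     rcSpans.map (fun se => (se.1, se.2, "report-highlight-rc")))
    (fun item => item.1) false

-- ===== PRECONDITION & SPEC =====
def Spec_build_highlight_spans_py (sequence : String) (fwd : String) (rev_comp : String) (out : List (Int × Int × String)) : Prop := out = build_highlight_spans_py_alt sequence fwd rev_comp
instance (sequence : String) (fwd : String) (rev_comp : String) (out : List (Int × Int × String)) : Decidable (Spec_build_highlight_spans_py sequence fwd rev_comp out) := by unfold Spec_build_highlight_spans_py; infer_instance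

-- ===== CLAIM =====
def Claim_equal_build_highlight_spans_py : Prop := ∀ (sequence : String) (fwd : String) (rev_comp : String), Dom_build_highlight_spans_py sequence fwd rev_comp → Spec_build_highlight_spans_py sequence fwd rev_comp (build_highlight_spans_py sequence fwd rev_comp)

-- ===== LEMMAS AND PROOFS =====

-- ---- the two occurrence finders agree ----

-- the scan returns [] from any position that has no occurrence to its right
lemma pvScanOcc_nil (s m : List Char) :
    ∀ (fuel i : Nat), ¬ m <:+: s.drop i → pvScanOcc s m fuel i = [] := by
  intro fuel
  induction fuel with
  | zero => intro i _; rfl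
  | succ n ih =>
    intro i h
    simp only [pvScanOcc]
    split
    · have hpre : ¬ m <+: s.drop i := fun hp => h hp.isInfix
      have hne : ¬ (s.drop i).take m.length = m := by
        intro ht
        exact hpre (by rw [← ht]; exact List.take_prefix _ _)
      rw [if_neg hne]
      apply ih
      intro hinf
      apply h
      have hsfx : s.drop (i+1) <:+ s.drop i := by
        have h1 : (s.drop i).drop 1 <:+ s.drop i := List.drop_suffix _ _
        simpa [List.drop_drop] using h1
      exact hinf.trans hsfx.isInfix
    · rfl

-- fuel irrelevance for the scan (any two sufficient fuels give the same list)
lemma pvScanOcc_fuel (s m : List Char) (hm : 0 < m.length) :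
    ∀ (f1 f2 i : Nat), i ≤ s.length → s.length + 1 - i ≤ f1 → s.length + 1 - i ≤ f2 →
      pvScanOcc s m f1 i = pvScanOcc s m f2 i := by
  intro f1
  induction f1 with
  | zero => intro f2 i hi h1 h2; omega
  | succ a ih =>
    intro f2 i hi h1 h2
    cases f2 with
    | zero => omega
    | succ b =>
      simp only [pvScanOcc]
      by_cases hle : i + m.length ≤ s.length
      · rw [if_pos hle, if_pos hle]
        by_cases ht : (s.drop i).take m.length = m
        · rw [if_pos ht, if_pos ht,
            ih b (i + m.length) (by omega) (by omega) (by omega)]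
        · rw [if_neg ht, if_neg ht]
          exact ih b (i + 1) (by omega) (by omega) (by omega)
      · rw [if_neg hle, if_neg hle]

-- the scan from i emits the first occurrence ≥ i and continues after it
lemma pvScanOcc_first (s m : List Char) (hm : 0 < m.length) :
    ∀ (fuel i j : Nat), i ≤ j → m <+: s.drop j →
    (∀ k, i ≤ k → k < j → ¬ m <+: s.drop k) →
    s.length + 1 - i ≤ fuel →
    pvScanOcc s m fuel i =
      ((j : Int), ((j + m.length : Nat) : Int)) :: pvScanOcc s m (s.length + 1) (j + m.length) := by
  intro fuel
  induction fuel with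
  | zero =>
    intro i j hij hmatch hmin hfuel
    have hjm : j + m.length ≤ s.length := by
      have := hmatch.length_le
      simp only [List.length_drop] at this
      omega
    omega
  | succ c ih =>
    intro i j hij hmatch hmin hfuel
    have hjm : j + m.length ≤ s.length := by
      have := hmatch.length_le
      simp only [List.length_drop] at this
      omega
    by_cases hij' : i = j
    · subst hij'
      conv_lhs => rw [pvScanOcc]
      rw [if_pos (by omega), if_pos (List.prefix_iff_eq_take.mp hmatch).symm,
        pvScanOcc_fuel s m hm c (s.length + 1) (i + m.length) (by omega) (by omega) (by omega)]
    · have hlt : i < j := lt_of_le_of_ne hij hij'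
      conv_lhs => rw [pvScanOcc]
      rw [if_pos (by omega)]
      have ht : ¬ (s.drop i).take m.length = m := by
        intro h
        exact hmin i le_rfl hlt (by rw [← h]; exact List.take_prefix _ _)
      rw [if_neg ht]
      exact ih (i + 1) j (by omega) hmatch (fun k hk1 hk2 => hmin k (by omega) hk2) (by omega)

-- A's find loop from position i = B's scan from position i (both list the non-overlapping
-- occurrences from left to right, each being the first match at or after the previous end)
lemma pvFindAllAux_eq_scan (s m : List Char) (hm : 0 < m.length) :
    ∀ (fa i : Nat), i ≤ s.length → s.length + 1 - i ≤ fa →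
      pvFindAllAux s m i fa = pvScanOcc s m (s.length + 1) i := by
  intro fa
  induction fa with
  | zero => intro i hi hf; omega
  | succ n ih =>
    intro i hi hf
    simp only [pvFindAllAux]
    by_cases hidx : PySem.Chars.findFrom s m (i : Int) none = -1
    · rw [if_pos hidx]
      have hnot : ¬ m <:+: s.drop i :=
        (PySem.Chars.findFrom_natCast_eq_neg_one_iff s m i hi).mp hidx
      exact (pvScanOcc_nil s m _ i hnot).symm
    · rw [if_neg hidx]
      obtain ⟨hge, hpre, hmin⟩ := PySem.Chars.findFrom_natCast_spec s m i hi hidx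
      set idx := PySem.Chars.findFrom s m (i : Int) none with hidxdef
      have hnn : 0 ≤ idx := le_trans (by exact_mod_cast Int.natCast_nonneg i) hge
      have hjge : i ≤ idx.toNat := by omega
      have hjm : idx.toNat + m.length ≤ s.length := by
        have := hpre.length_le
        simp only [List.length_drop] at this
        omega
      rw [pvScanOcc_first s m hm (s.length + 1) i idx.toNat hjge hpre hmin (by omega)]
      have h1 : idx = ((idx.toNat : Nat) : Int) := (Int.toNat_of_nonneg hnn).symm
      have h2 : idx + (m.length : Int) = ((idx.toNat + m.length : Nat) : Int) := by
        push_cast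
        omega
      rw [ih (idx.toNat + m.length) (by omega) (by omega)]
      rw [pvScanOcc_fuel s m hm (s.length + 1) (s.length + 1) (idx.toNat + m.length)
            (by omega) (by omega) (by omega)]
      exact congrArg₂ (· :: ·) (by rw [← h1, ← h2]) rfl

-- main: A's find-based occurrence list = B's scan-based one
lemma pvFindAll_eq_pvOccurrences (s m : List Char) : pvFindAll s m = pvOccurrences s m := by
  unfold pvFindAll pvOccurrences
  by_cases hm : m.length = 0
  · rw [if_pos (by simpa [List.isEmpty_iff, List.length_eq_zero_iff] using hm), if_pos hm]
  · rw [if_neg (by simpa [List.isEmpty_iff, ← List.length_eq_zero_iff] using hm), if_neg hm]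
    exact pvFindAllAux_eq_scan s m (by omega) (s.length + 1) 0 (by omega) (by omega)

-- ---- A's loops reshaped ----

lemma mem_foldl_updateRange (l : List (Int × Int)) (s0 : PySem.Set Int) (i : Int) :
    i ∈ l.foldl (fun s se => PySem.Set.update s (PySem.List.pyRange se.1 se.2 1)) s0 ↔
      i ∈ s0 ∨ ∃ se ∈ l, se.1 ≤ i ∧ i < se.2 := by
  induction l generalizing s0 with
  | nil => simp
  | cons x xs ih =>
    simp only [List.foldl_cons, ih, PySem.Set.mem_update, PySem.List.mem_pyRange_one,
      List.mem_cons]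
    constructor
    · rintro (⟨h | h⟩ | ⟨se, hse, h1, h2⟩)
      · exact Or.inl h
      · exact Or.inr ⟨x, Or.inl rfl, h⟩
      · exact Or.inr ⟨se, Or.inr hse, h1, h2⟩
    · rintro (h | ⟨se, hse | hse, h1, h2⟩)
      · exact Or.inl (Or.inl h)
      · exact Or.inl (Or.inr (by subst hse; exact ⟨h1, h2⟩))
      · exact Or.inr ⟨se, hse, h1, h2⟩

lemma foldl_pair_split (F : List (Int × Int)) :
    F.foldl
      (fun (acc : List (Int × Int × String) × PySem.Set Int) se =>
        (acc.1 ++ [(se.1, se.2, "report-highlight-fwd")],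
         PySem.Set.update acc.2 (PySem.List.pyRange se.1 se.2 1)))
      ([], PySem.Set.empty)
    = (F.map (fun se => (se.1, se.2, "report-highlight-fwd")),
       F.foldl (fun s se => PySem.Set.update s (PySem.List.pyRange se.1 se.2 1))
         PySem.Set.empty) := by
  rw [PySem.List.foldl_prod_mk
        (f := fun acc (se : Int × Int) => acc ++ [(se.1, se.2, "report-highlight-fwd")])
        (g := fun s (se : Int × Int) => PySem.Set.update s (PySem.List.pyRange se.1 se.2 1))]
  simp only [PySem.List.foldl_append_singleton_eq_map, List.nil_append]

-- A's skip-loop = append the kept (filtered) elements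
lemma foldl_skip_eq_filter {α β : Type} (l : List α) (p : α → Bool) (f : α → β) (acc : List β) :
    l.foldl (fun acc x => if p x then acc else acc ++ [f x]) acc
      = acc ++ (l.filter (fun x => !p x)).map f := by
  induction l generalizing acc with
  | nil => simp
  | cons x xs ih =>
    by_cases h : p x <;> simp [List.foldl_cons, ih, h]

-- A's per-index occupied test on an rc span = the negation of B's disjointness test
lemma occupied_eq_not_disjoint (F : List (Int × Int)) (hF : ∀ se ∈ F, se.1 < se.2)
    (rs re : Int) (hrc : rs < re) :
    ((PySem.List.pyRange rs re 1).any fun idx =>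
        PySem.Set.contains
          (F.foldl (fun s se => PySem.Set.update s (PySem.List.pyRange se.1 se.2 1))
            PySem.Set.empty) idx)
      = !(F.all (fun f => decide (re ≤ f.1) || decide (f.2 ≤ rs))) := by
  apply Bool.eq_iff_iff.mpr
  simp only [List.any_eq_true, PySem.Set.contains_iff, mem_foldl_updateRange,
    PySem.List.mem_pyRange_one, Bool.not_eq_true', List.all_eq_false,
    Bool.or_eq_true, decide_eq_true_eq, not_or, not_le]
  constructor
  · rintro ⟨i, ⟨hi1, hi2⟩, h | ⟨se, hse, h1, h2⟩⟩
    · simp [PySem.Set.empty] at h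
    · exact ⟨se, hse, by omega, by omega⟩
  · rintro ⟨f, hf, h1, h2⟩
    have hw := hF f hf
    exact ⟨max rs f.1, ⟨le_max_left _ _, by omega⟩, Or.inr ⟨f, hf, by omega, by omega⟩⟩

-- every span emitted by A's find loop has positive width
lemma pvFindAllAux_pos (s m : List Char) (hm : m ≠ []) :
    ∀ (start fuel : Nat), ∀ se ∈ pvFindAllAux s m start fuel, se.1 < se.2 := by
  intro start fuel
  induction fuel generalizing start with
  | zero => intro se h; simp [pvFindAllAux] at h
  | succ n ih =>
    intro se h
    simp only [pvFindAllAux] at h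
    split at h
    · simp at h
    · rcases List.mem_cons.mp h with h1 | h1
      · subst h1
        have : 0 < m.length := List.length_pos_iff.mpr hm
        simp only
        omega
      · exact ih _ _ h1

lemma pvFindAll_pos (s m : List Char) : ∀ se ∈ pvFindAll s m, se.1 < se.2 := by
  intro se h
  unfold pvFindAll at h
  split at h
  · simp at h
  · exact pvFindAllAux_pos s m (by simpa [List.isEmpty_iff] using ‹¬ m.isEmpty = true›) 0 _ se h

-- ===== VERDICT =====
theorem build_highlight_spans_py_spec : Claim_equal_build_highlight_spans_py := by
  intro sequence fwd rev_comp _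
  unfold Spec_build_highlight_spans_py build_highlight_spans_py build_highlight_spans_py_alt
  simp only [← pvFindAll_eq_pvOccurrences]
  set F := pvFindAll sequence.toList (PySem.Chars.lower fwd.toList) with hFdef
  set R := pvFindAll sequence.toList (PySem.Chars.lower rev_comp.toList) with hRdef
  rw [foldl_pair_split F]
  congr 1
  have hcong : R.foldl
      (fun (acc : List (Int × Int × String)) se =>
        if (PySem.List.pyRange se.1 se.2 1).any (fun idx =>
             PySem.Set.contains
               (F.foldl (fun st se => PySem.Set.update st (PySem.List.pyRange se.1 se.2 1))
                 PySem.Set.empty) idx) then acc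
        else acc ++ [(se.1, se.2, "report-highlight-rc")])
      (F.map (fun se => (se.1, se.2, "report-highlight-fwd")))
    = R.foldl
      (fun (acc : List (Int × Int × String)) se =>
        if !(F.all (fun f => decide (se.2 ≤ f.1) || decide (f.2 ≤ se.1))) then acc
        else acc ++ [(se.1, se.2, "report-highlight-rc")])
      (F.map (fun se => (se.1, se.2, "report-highlight-fwd"))) := by
    apply PySem.List.foldl_congr_mem
    intro acc se hse
    rw [occupied_eq_not_disjoint F (pvFindAll_pos _ _) se.1 se.2 (pvFindAll_pos _ _ se hse)]
  rw [hcong, foldl_skip_eq_filter]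
  simp only [Bool.not_not]
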